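-- pv_equiv track=rewrite | github.com/cemrtkn/conversational-collapse | scripts/interpretability/test.py | define_msg_tree
-- ===== SOURCE A (Python) =====
-- from typing import Dict, List
--
-- def define_msg_tree(
--     messages: List[Dict[str, str]],
--     system_prompt: str | None = None,
-- ) -> List[Dict[str, str]]:
--     """
--     Canonicalize conversation into a stable chat format:
--     - Optional system prompt first
--     - Strict user/assistant alternation
--     - Last message is always `user`
--     """
--     tree = []
--
--     if system_prompt:
--         tree.append({"role": "system", "content": system_prompt})
--
--     # Reassign roles based on recency
--     rewritten = []
--     for i, message in enumerate(reversed(messages)):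
--         role = "user" if i % 2 == 0 else "assistant"
--         rewritten.append({"role": role, "content": message["content"]})
--
--     tree.extend(reversed(rewritten))
--     return tree
-- ===== SOURCE B (Python) =====
-- def define_msg_tree(messages, system_prompt=None):
--     # Consume the conversation pairwise from the end: each pop()-ed tail
--     # message is a 'user' turn, its predecessor (if any) the 'assistant'
--     # turn of the same exchange; collect exchanges as chunks, then lay
--     # them back out oldest-first.
--     chunks = []
--     rest = list(messages)
--     while rest:
--         last = rest.pop()
--         if rest:
--             prev = rest.pop()
--             chunks.append([{"role": "assistant", "content": prev["content"]},
--                            {"role": "user", "content": last["content"]}])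
--         else:
--             chunks.append([{"role": "user", "content": last["content"]}])
--     tree = [{"role": "system", "content": system_prompt}] if system_prompt else []
--     for chunk in reversed(chunks):
--         tree.extend(chunk)
--     return tree
-- ===== Notes on version B (the rewrite author's own statement) =====
-- stated objective: alternative
-- what changed: Instead of enumerating the reversed list and assigning each role from its index parity, B pops the messages pairwise from the end, grouping each (assistant, user) exchange into a chunk with roles fixed by position in the pair (no index parity at all), and finally lays the chunks out oldest-first.
import Mathlib
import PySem

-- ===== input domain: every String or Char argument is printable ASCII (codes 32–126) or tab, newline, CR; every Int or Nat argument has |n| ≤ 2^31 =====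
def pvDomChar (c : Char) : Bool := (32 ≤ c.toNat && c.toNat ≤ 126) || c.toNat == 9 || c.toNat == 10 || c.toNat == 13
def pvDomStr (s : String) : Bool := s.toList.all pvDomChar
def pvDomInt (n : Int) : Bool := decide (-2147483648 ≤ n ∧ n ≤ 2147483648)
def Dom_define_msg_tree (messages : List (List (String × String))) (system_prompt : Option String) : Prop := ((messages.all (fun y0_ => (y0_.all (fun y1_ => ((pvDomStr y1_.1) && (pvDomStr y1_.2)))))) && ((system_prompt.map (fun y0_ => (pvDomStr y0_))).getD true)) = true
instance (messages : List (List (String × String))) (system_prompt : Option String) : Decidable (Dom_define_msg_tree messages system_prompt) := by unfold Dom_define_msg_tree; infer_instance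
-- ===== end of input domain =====

-- ===== PORT A =====
-- B replaces A's index-parity role assignment over the reversed list by pairwise
-- popping of (assistant, user) exchange chunks from the end — objective: alternative;
-- return values proved equal on Pre_.
-- A: optional system entry, then roles assigned walking the REVERSED messages (i % 2), result reversed back.
def define_msg_tree (messages : List (List (String × String))) (system_prompt : Option String) : List (List (String × String)) :=
  let tree : List (List (String × String)) :=
    match system_prompt with
    | some s => if s = "" then [] else [[("role", "system"), ("content", s)]]
    | none => []
  let rewritten : List (List (String × String)) :=
    (PySem.List.enumerate messages.reverse).map
      (fun p => [("role", if p.1 % 2 == 0 then "user" else "assistant"),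
                 ("content", ((PySem.Dict.mk p.2).get? "content").getD "")])
  tree ++ rewritten.reverse

-- ===== PORT B =====
-- B: while rest: last = rest.pop(); if rest: prev = rest.pop(); chunks.append([asst prev, user last])
--    else: chunks.append([user last]);  then tree extended with reversed(chunks).
def popChunks (rest : List (List (String × String))) : List (List (List (String × String))) :=
  match h : rest.getLast? with
  | none => []
  | some last =>
    let rest1 := rest.dropLast
    match rest1.getLast? with
    | none => [[[("role", "user"), ("content", ((PySem.Dict.mk last).get? "content").getD "")]]]
    | some prev =>
        [[("role", "assistant"), ("content", ((PySem.Dict.mk prev).get? "content").getD "")],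
         [("role", "user"), ("content", ((PySem.Dict.mk last).get? "content").getD "")]]
        :: popChunks rest1.dropLast
termination_by rest.length
decreasing_by
  simp only [List.length_dropLast]
  have hne : rest ≠ [] := by
    intro hnil; rw [hnil] at h; simp at h
  have : 0 < rest.length := List.length_pos_iff.mpr hne
  omega

def define_msg_tree_alt (messages : List (List (String × String))) (system_prompt : Option String) : List (List (String × String)) :=
  let chunks := popChunks messages
  let tree : List (List (String × String)) :=
    match system_prompt with
    | some s => if s = "" then [] else [[("role", "system"), ("content", s)]]
    | none => []
  tree ++ chunks.reverse.flatten

-- ===== PRECONDITION & SPEC =====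
-- Pre_ excludes messages missing the "content" key, on which both Pythons raise KeyError.
def Pre_define_msg_tree (messages : List (List (String × String))) (system_prompt : Option String) : Prop :=
  ∀ m ∈ messages, ((PySem.Dict.mk m).get? "content").isSome
instance (messages : List (List (String × String))) (system_prompt : Option String) : Decidable (Pre_define_msg_tree messages system_prompt) := by unfold Pre_define_msg_tree; infer_instance
def pvWitness_define_msg_tree : (List (List (String × String))) × Option String :=
  ([[("content", "hello")], [("content", "hi"), ("x", "y")]], some "be nice")
def Spec_define_msg_tree (messages : List (List (String × String))) (system_prompt : Option String) (out : List (List (String × String))) : Prop := out = define_msg_tree_alt messages system_prompt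
instance (messages : List (List (String × String))) (system_prompt : Option String) (out : List (List (String × String))) : Decidable (Spec_define_msg_tree messages system_prompt out) := by unfold Spec_define_msg_tree; infer_instance

-- ===== CLAIM =====
def Claim_equal_define_msg_tree : Prop := ∀ (messages : List (List (String × String))) (system_prompt : Option String), Dom_define_msg_tree messages system_prompt → Pre_define_msg_tree messages system_prompt → Spec_define_msg_tree messages system_prompt (define_msg_tree messages system_prompt)

-- ===== LEMMAS AND PROOFS =====

def mkUser (m : List (String × String)) : List (String × String) :=
  [("role", "user"), ("content", ((PySem.Dict.mk m).get? "content").getD "")]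
def mkAsst (m : List (String × String)) : List (String × String) :=
  [("role", "assistant"), ("content", ((PySem.Dict.mk m).get? "content").getD "")]

-- chunks produced from rest = r.reverse, as front-consuming recursion on r
def qChunks : List (List (String × String)) → List (List (List (String × String)))
  | [] => []
  | [a] => [[mkUser a]]
  | a :: b :: rest => [mkAsst b, mkUser a] :: qChunks rest

theorem popChunks_rev (r : List (List (String × String))) :
    popChunks r.reverse = qChunks r := by
  induction r using qChunks.induct with
  | case1 => simp [popChunks, qChunks]
  | case2 a => simp [popChunks, qChunks, mkUser]
  | case3 a b rest ih =>
      have h1 : (a :: b :: rest).reverse.getLast? = some a := by simp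
      have h2 : (a :: b :: rest).reverse.dropLast = rest.reverse ++ [b] := by
        simp [List.reverse_cons, List.append_assoc]
      rw [qChunks, popChunks]
      split
      · next heq => rw [h1] at heq; cases heq
      · next last heq =>
          rw [h1] at heq; injection heq with hl; subst hl
          simp [mkUser, mkAsst, ih]

theorem enum_map_rev (r : List (List (String × String))) (s : Int) (hs : s % 2 = 0) :
    ((PySem.List.enumerate r s).map
      (fun p => [("role", if p.1 % 2 == 0 then "user" else "assistant"),
                 ("content", ((PySem.Dict.mk p.2).get? "content").getD "")])).reverse
      = (qChunks r).reverse.flatten := by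
  induction r using qChunks.induct generalizing s with
  | case1 => simp [qChunks, PySem.List.enumerate_nil]
  | case2 a =>
      simp [qChunks, PySem.List.enumerate_cons, PySem.List.enumerate_nil, mkUser, hs]
  | case3 a b rest ih =>
      have hs1 : (s + 1) % 2 ≠ 0 := by omega
      have hs2 : (s + 1 + 1) % 2 = 0 := by omega
      simp only [PySem.List.enumerate_cons, List.map_cons, List.reverse_cons,
        qChunks, List.flatten_append, List.flatten_cons]
      rw [ih (s + 1 + 1) hs2]
      simp [mkUser, mkAsst, hs, hs1]

theorem define_msg_tree_spec : Claim_equal_define_msg_tree := by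
  intro messages system_prompt _ _
  unfold Spec_define_msg_tree define_msg_tree define_msg_tree_alt
  simp only []
  have h1 : popChunks messages = qChunks messages.reverse := by
    have := popChunks_rev messages.reverse
    rwa [List.reverse_reverse] at this
  rw [h1, enum_map_rev messages.reverse 0 (by decide)]
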